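-- pv_equiv track=rewrite | github.com/shavarani/SpEL | src/spel/data_loader.py | convert_is_in_mention_to_bioes
-- ===== SOURCE A (Python) =====
-- def convert_is_in_mention_to_bioes(is_in_mention):
--     # B = 0, I = 1, O = 2, E = 3, S = 4
--     bioes = []
--     for iim, current in enumerate(is_in_mention):
--         before = is_in_mention[iim - 1] if iim > 0 else 0
--         after = is_in_mention[iim + 1] if iim < len(is_in_mention) - 1 else 0
--         bioes.append(
--             2 if not current else (4 if not before and not after else (0 if not before else (3 if not after else 1))))
--     return bioes
-- ===== SOURCE B (Python) =====
-- def convert_is_in_mention_to_bioes(is_in_mention):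
--     # B = 0, I = 1, O = 2, E = 3, S = 4
--     bioes = []
--     rest = is_in_mention
--     while rest:
--         if not rest[0]:
--             bioes.append(2)
--             rest = rest[1:]
--         else:
--             k = 1
--             while k < len(rest) and rest[k]:
--                 k += 1
--             bioes.extend([4] if k == 1 else [0] + [1] * (k - 2) + [3])
--             rest = rest[k:]
--     return bioes
-- ===== Notes on version B (the rewrite author's own statement) =====
-- stated objective: alternative
-- what changed: B emits whole BIOES tag blocks per maximal run of truthy flags (S for length-1 runs, B/I.../E otherwise) instead of computing each tag from its two neighbours by index lookups.
import Mathlib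
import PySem

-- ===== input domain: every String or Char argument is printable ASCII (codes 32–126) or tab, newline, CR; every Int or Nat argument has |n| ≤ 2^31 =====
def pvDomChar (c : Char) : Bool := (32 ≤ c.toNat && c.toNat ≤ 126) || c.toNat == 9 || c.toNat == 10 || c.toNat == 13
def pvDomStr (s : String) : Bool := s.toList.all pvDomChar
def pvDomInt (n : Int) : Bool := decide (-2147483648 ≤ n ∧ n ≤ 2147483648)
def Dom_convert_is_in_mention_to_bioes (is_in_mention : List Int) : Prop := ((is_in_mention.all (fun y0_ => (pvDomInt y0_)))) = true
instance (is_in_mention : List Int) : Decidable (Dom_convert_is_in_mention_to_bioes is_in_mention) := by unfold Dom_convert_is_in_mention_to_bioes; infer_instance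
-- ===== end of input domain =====

-- B replaces A's per-index neighbour lookups by emitting one BIOES tag block per maximal run of truthy flags (alternative decomposition, same cost).

-- ===== PORT A =====
-- the loop body of A: given the whole list and one (index, element) pair, the appended tag
def pvTagA (l : List Int) (p : Int × Int) : Int :=
  let iim := p.1
  let current := p.2
  let before : Int := if iim > 0 then (PySem.List.pyGet? l (iim - 1)).getD 0 else 0
  let after : Int := if iim < (l.length : Int) - 1 then (PySem.List.pyGet? l (iim + 1)).getD 0 else 0
  if current = 0 then 2
  else if before = 0 ∧ after = 0 then 4
  else if before = 0 then 0
  else if after = 0 then 3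
  else 1

def convert_is_in_mention_to_bioes (is_in_mention : List Int) : List Int :=
  (PySem.List.enumerate is_in_mention 0).foldl
    (fun bioes p => bioes ++ [pvTagA is_in_mention p]) []

-- ===== PORT B =====
-- tags for one maximal truthy run of length k ≥ 1: [4] if k == 1 else [0] + [1]*(k-2) + [3]
def pvRunTags (k : Nat) : List Int :=
  if k = 1 then [4] else 0 :: (List.replicate (k - 2) 1 ++ [3])

def convert_is_in_mention_to_bioes_alt (is_in_mention : List Int) : List Int :=
  match is_in_mention with
  | [] => []
  | x :: rest =>
    if x = 0 then 2 :: convert_is_in_mention_to_bioes_alt rest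
    else
      let k := 1 + (rest.takeWhile (fun y => y != 0)).length
      pvRunTags k ++ convert_is_in_mention_to_bioes_alt (rest.dropWhile (fun y => y != 0))
termination_by is_in_mention.length
decreasing_by
  · simp
  · simpa using Nat.lt_succ_of_le (List.length_dropWhile_le _ _)

-- ===== PRECONDITION & SPEC =====
def Spec_convert_is_in_mention_to_bioes (is_in_mention : List Int) (out : List Int) : Prop := out = convert_is_in_mention_to_bioes_alt is_in_mention
instance (is_in_mention : List Int) (out : List Int) : Decidable (Spec_convert_is_in_mention_to_bioes is_in_mention out) := by unfold Spec_convert_is_in_mention_to_bioes; infer_instance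

-- ===== CLAIM (what is proved, stated in full; the proofs are below) =====
def Claim_equal_convert_is_in_mention_to_bioes : Prop := ∀ (is_in_mention : List Int), Dom_convert_is_in_mention_to_bioes is_in_mention → Spec_convert_is_in_mention_to_bioes is_in_mention (convert_is_in_mention_to_bioes is_in_mention)

-- ===== LEMMAS AND PROOFS =====

-- one-element tag as a function of previous value, current value and next value
def pvTag (prev cur next : Int) : Int :=
  if cur = 0 then 2
  else if prev = 0 ∧ next = 0 then 4
  else if prev = 0 then 0
  else if next = 0 then 3
  else 1

-- A's result, recomputed as a prev-threading recursion with one-element lookahead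
def pvAmap (prev : Int) : List Int → List Int
  | [] => []
  | x :: rest => pvTag prev x (rest.headD 0) :: pvAmap x rest

-- tags for the tail of a run: pvRunTail (k+1) = [1]*k ++ [3], pvRunTail 0 = []
def pvRunTail : Nat → List Int
  | 0 => []
  | k + 1 => List.replicate k 1 ++ [3]

theorem pv_foldl_append_map (f : Int × Int → Int) :
    ∀ (xs : List (Int × Int)) (acc : List Int),
      xs.foldl (fun a x => a ++ [f x]) acc = acc ++ xs.map f := by
  intro xs
  induction xs with
  | nil => simp
  | cons x xs ih => intro acc; simp [List.foldl, ih]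

theorem pv_enum_amap (full : List Int) :
    ∀ (t : List Int) (i : Nat), full.drop i = t →
      (PySem.List.enumerate t (i : Int)).map (pvTagA full)
        = pvAmap (if i = 0 then 0 else (full[i-1]?).getD 0) t := by
  intro t
  induction t with
  | nil => intro i _; simp [PySem.List.enumerate_nil, pvAmap]
  | cons x t' ih =>
    intro i hdrop
    have hi : i < full.length := by
      by_contra h
      simp [List.drop_eq_nil_of_le (Nat.le_of_not_lt h)] at hdrop
    have hfi : full[i]? = some x := by
      have : (full.drop i)[0]? = some x := by rw [hdrop]; simp
      simpa [List.getElem?_drop] using this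
    have hdrop' : full.drop (i+1) = t' := by
      have := congrArg (List.drop 1) hdrop
      simpa [List.drop_drop, Nat.add_comm] using this
    have hnext : (full[i+1]?).getD 0 = t'.headD 0 := by
      have : full[i+1]? = t'[0]? := by
        rw [← hdrop']; simp [List.getElem?_drop]
      cases t' <;> simp [this]
    rw [PySem.List.enumerate_cons, List.map_cons]
    have htag : pvTagA full ((i : Int), x)
        = pvTag (if i = 0 then 0 else (full[i-1]?).getD 0) x (t'.headD 0) := by
      simp only [pvTagA, pvTag]
      have hbefore : (if (i : Int) > 0 then (PySem.List.pyGet? full ((i : Int) - 1)).getD 0 else 0)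
          = (if i = 0 then 0 else (full[i-1]?).getD 0) := by
        rcases Nat.eq_zero_or_pos i with h0 | hpos
        · simp [h0]
        · have : ((i : Int) - 1) = ((i - 1 : Nat) : Int) := by omega
          simp [Nat.pos_iff_ne_zero.mp hpos, this,
            PySem.List.pyGet?_natCast]
      have hafter : (if (i : Int) < (full.length : Int) - 1 then (PySem.List.pyGet? full ((i : Int) + 1)).getD 0 else 0)
          = t'.headD 0 := by
        by_cases hlt : i + 1 < full.length
        · have : ((i : Int) + 1) = ((i + 1 : Nat) : Int) := by omega
          rw [if_pos (by exact_mod_cast (by omega : (i:Int) < (full.length:Int) - 1)), this,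
            PySem.List.pyGet?_natCast, hnext]
        · have ht' : t' = [] := by
            have : full.drop (i+1) = [] := List.drop_eq_nil_of_le (by omega)
            rw [hdrop'] at this; exact this
          rw [if_neg (by intro h; exact hlt (by omega : i + 1 < full.length)), ht']
          simp
      rw [hbefore, hafter]
    rw [htag]
    have : ((i : Int) + 1) = ((i + 1 : Nat) : Int) := by omega
    rw [this, ih (i+1) hdrop']
    simp [pvAmap, hfi]

-- the prefix tag of a run start does not matter when the list starts falsy (or is empty)
theorem pv_amap_indep (t : List Int) (p q : Int)
    (h : t = [] ∨ ∃ t', t = (0:Int) :: t') : pvAmap p t = pvAmap q t := by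
  rcases h with h | ⟨t', h⟩ <;> subst h <;> simp [pvAmap, pvTag]

theorem pv_drop_head (t : List Int) :
    t.dropWhile (fun y => y != 0) = [] ∨
      ∃ t', t.dropWhile (fun y => y != 0) = (0:Int) :: t' := by
  induction t with
  | nil => left; rfl
  | cons x t' ih =>
    by_cases hx : x = 0
    · right; exact ⟨t', by simp [List.dropWhile, hx]⟩
    · rw [List.dropWhile_cons_of_pos (by simp [hx])]; exact ih

theorem pv_amap_run : ∀ (t : List Int) (prev : Int), prev ≠ 0 →
    pvAmap prev t
      = pvRunTail ((t.takeWhile (fun y => y != 0)).length)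
        ++ pvAmap 0 (t.dropWhile (fun y => y != 0)) := by
  intro t
  induction t with
  | nil => intro prev _; simp [pvAmap, pvRunTail]
  | cons x t' ih =>
    intro prev hprev
    by_cases hx : x = 0
    · subst hx
      simp [pvAmap, pvTag, List.takeWhile, List.dropWhile, pvRunTail]
    · rw [List.takeWhile_cons_of_pos (by simp [hx]), List.dropWhile_cons_of_pos (by simp [hx])]
      show pvTag prev x (t'.headD 0) :: pvAmap x t' = _
      rcases htw : t'.takeWhile (fun y => y != 0) with _ | ⟨y, tw'⟩
      · -- run ends at x : next is falsy or absent
        have hhead : t'.headD 0 = 0 := by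
          cases t' with
          | nil => rfl
          | cons z t'' =>
            rw [List.takeWhile_cons] at htw
            by_cases hz : z = 0
            · simp [hz]
            · simp [hz] at htw
        have hcase : t' = [] ∨ ∃ t'', t' = (0:Int) :: t'' := by
          cases t' with
          | nil => exact Or.inl rfl
          | cons z t'' =>
            exact Or.inr ⟨t'', by rw [show z = (0:Int) from by simpa using hhead]⟩
        have hdw : t'.dropWhile (fun y => y != 0) = t' := by
          rcases hcase with h | ⟨t'', h⟩ <;> subst h <;> simp
        have hhead2 : t'.head?.getD 0 = 0 := by cases t' <;> simpa using hhead
        rw [hdw, pv_amap_indep t' x 0 hcase]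
        simp [pvTag, hx, hhead2, hprev, pvRunTail]
      · -- run continues
        have hy : y ≠ 0 := by
          have := List.takeWhile_prefix (l := t') (p := fun y => y != 0)
          have hmem : y ∈ t'.takeWhile (fun y => y != 0) := by rw [htw]; simp
          have := List.mem_takeWhile_imp hmem
          simpa using this
        have hhead : t'.headD 0 = y := by
          cases t' with
          | nil => simp [List.takeWhile] at htw
          | cons z t'' =>
            rw [List.takeWhile_cons] at htw
            by_cases hz : z = 0
            · simp [hz] at htw
            · simp [hz] at htw; simp [htw.1]
        have hhead2 : t'.head?.getD 0 = y := by cases t' <;> simpa using hhead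
        rw [ih x hx, htw]
        have hlen : ∀ k, pvRunTail (k + 1 + 1) = 1 :: pvRunTail (k + 1) := by
          intro k; simp [pvRunTail, List.replicate]
        simp only [List.length_cons, hlen]
        simp [pvTag, hx, hprev, hhead2, hy]

theorem pv_alt_amap : ∀ (t : List Int), convert_is_in_mention_to_bioes_alt t = pvAmap 0 t := by
  intro t
  induction t using convert_is_in_mention_to_bioes_alt.induct with
  | case1 => simp [convert_is_in_mention_to_bioes_alt, pvAmap]
  | case2 rest ih =>
    rw [convert_is_in_mention_to_bioes_alt]
    simp only [ih]
    simp [pvAmap, pvTag]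
  | case3 x rest hx ih =>
    rw [convert_is_in_mention_to_bioes_alt]
    simp only [if_neg hx, ih]
    rw [show pvAmap 0 (x :: rest) = pvTag 0 x (rest.headD 0) :: pvAmap x rest from rfl,
      pv_amap_run rest x hx,
      pv_amap_indep (rest.dropWhile (fun y => y != 0)) 0 0 (pv_drop_head rest)]
    rcases htw : rest.takeWhile (fun y => y != 0) with _ | ⟨y, tw'⟩
    · have hhead : rest.headD 0 = 0 := by
        cases rest with
        | nil => rfl
        | cons z t'' =>
          rw [List.takeWhile_cons] at htw
          by_cases hz : z = 0
          · simp [hz]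
          · simp [hz] at htw
      have hhead2 : rest.head?.getD 0 = 0 := by cases rest <;> simpa using hhead
      simp [pvRunTags, pvRunTail, pvTag, hx, hhead2]
    · have hy : y ≠ 0 := by
        have hmem : y ∈ rest.takeWhile (fun y => y != 0) := by rw [htw]; simp
        simpa using List.mem_takeWhile_imp hmem
      have hhead : rest.headD 0 = y := by
        cases rest with
        | nil => simp [List.takeWhile] at htw
        | cons z t'' =>
          rw [List.takeWhile_cons] at htw
          by_cases hz : z = 0
          · simp [hz] at htw
          · simp [hz] at htw; simp [htw.1]
      have : pvRunTags (1 + (tw'.length + 1)) = 0 :: pvRunTail (tw'.length + 1) := by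
        simp [pvRunTags, pvRunTail, show 1 + (tw'.length + 1) = tw'.length + 2 by omega]
      have hhead2 : rest.head?.getD 0 = y := by cases rest <;> simpa using hhead
      simp only [List.length_cons, this]
      simp [pvTag, hx, hhead2, hy]

-- ===== VERDICT (by name: the statement is the Claim_ definition above) =====
theorem convert_is_in_mention_to_bioes_spec : Claim_equal_convert_is_in_mention_to_bioes := by
  intro l _
  show convert_is_in_mention_to_bioes l = convert_is_in_mention_to_bioes_alt l
  rw [convert_is_in_mention_to_bioes, pv_foldl_append_map (pvTagA l), List.nil_append,
    pv_alt_amap]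
  have := pv_enum_amap l l 0 (by simp)
  simpa using this
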